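-- pv_equiv track=rewrite | github.com/SCE-Development/SCE-ML | CHESS-AI/chessboard.py | bishopForeslashGen
-- ===== SOURCE A (Python) =====
-- def bishopForeslashGen(index):
--     uint64 = 18446744073709551615
--     bishopBb = 0b0
--     rank = index//8
--     file = index % 8
--     atk_rank = rank + 1
--     atk_file = file + 1
--     while atk_rank < 8 and atk_file < 8:  # Northeast
--         bishopBb = (bishopBb | (0b1 << (atk_rank*8 + atk_file))) & uint64
--         atk_rank += 1
--         atk_file += 1
--     atk_rank = rank - 1
--     atk_file = file - 1
--     while atk_rank >= 0 and atk_file >= 0:  # Southwest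
--         bishopBb = (bishopBb | (0b1 << (atk_rank*8 + atk_file))) & uint64
--         atk_rank -= 1
--         atk_file -= 1
--     return bishopBb
-- ===== SOURCE B (Python) =====
-- def bishopForeslashGen(index):
--     # Square indices are 0..63-based; negative indices are a caller error.
--     if index < 0:
--         raise ValueError("square index must be non-negative")
--     # Single invariant-based scan: the foreslash diagonal is {(r, f) : r - f == rank - file}.
--     rank = index // 8
--     file = index % 8
--     bb = 0
--     for r in range(8):
--         f = file + (r - rank)
--         if 0 <= f < 8 and r != rank:
--             bb |= 1 << (r * 8 + f)
--     return bb
-- ===== Notes on version B (the rewrite author's own statement) =====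
-- stated objective: simpler
-- what changed: Replaces A's two opposite directional walks (northeast and southwest, each step masked to a machine word) by one scan over the eight board ranks using the invariant that rank minus file is constant on the foreslash diagonal, setting the bit of each on-board non-origin square of that diagonal; B rejects negative square indices with ValueError, so Pre_ admits exactly the non-negative indices.
-- outside the precondition, e.g. on bishopForeslashGen(-3): A returns 32832, B raises ValueError; on bishopForeslashGen(-9): A returns 0, B raises ValueError
import Mathlib
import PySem

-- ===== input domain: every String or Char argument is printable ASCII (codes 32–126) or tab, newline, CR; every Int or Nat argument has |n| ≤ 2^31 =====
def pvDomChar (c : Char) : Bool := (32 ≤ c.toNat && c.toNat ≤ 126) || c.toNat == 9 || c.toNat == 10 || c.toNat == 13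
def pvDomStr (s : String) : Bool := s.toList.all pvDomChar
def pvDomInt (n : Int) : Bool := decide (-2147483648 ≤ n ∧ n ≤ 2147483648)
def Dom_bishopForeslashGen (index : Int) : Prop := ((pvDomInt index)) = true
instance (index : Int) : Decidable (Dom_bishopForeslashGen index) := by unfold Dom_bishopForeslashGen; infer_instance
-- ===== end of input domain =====

-- B replaces A's two directional walks by one scan over the 8 ranks using the diagonal
-- invariant rank - file = const (objective: simpler); B raises ValueError on negative
-- square indices, so Pre_ is exactly the non-negative indices.

-- ===== PORT A =====
-- while atk_rank < 8 and atk_file < 8: bb = (bb | (1 << (atk_rank*8+atk_file))) & uint64; atk_rank += 1; atk_file += 1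
-- fuel (8 - atk_rank).toNat: 0 exactly when the loop condition already fails on atk_rank, so the port is exact.
def pvNeLoop : Nat → Int → Int → Int → Int
  | 0, bb, _, _ => bb
  | n + 1, bb, atkRank, atkFile =>
    if atkRank < 8 ∧ atkFile < 8 then
      pvNeLoop n (PySem.Int.band (PySem.Int.bor bb ((1 : Int) <<< (atkRank * 8 + atkFile).toNat)) 18446744073709551615) (atkRank + 1) (atkFile + 1)
    else bb

-- while atk_rank >= 0 and atk_file >= 0: bb = (bb | (1 << (atk_rank*8+atk_file))) & uint64; atk_rank -= 1; atk_file -= 1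
-- fuel (atk_file + 1).toNat: 0 exactly when the loop condition already fails on atk_file, so the port is exact.
def pvSwLoop : Nat → Int → Int → Int → Int
  | 0, bb, _, _ => bb
  | n + 1, bb, atkRank, atkFile =>
    if 0 ≤ atkRank ∧ 0 ≤ atkFile then
      pvSwLoop n (PySem.Int.band (PySem.Int.bor bb ((1 : Int) <<< (atkRank * 8 + atkFile).toNat)) 18446744073709551615) (atkRank - 1) (atkFile - 1)
    else bb

def bishopForeslashGen (index : Int) : Int :=
  let rank := PySem.Int.floordiv index 8
  let file := PySem.Int.mod index 8
  let bb1 := pvNeLoop (8 - (rank + 1)).toNat 0 (rank + 1) (file + 1)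
  pvSwLoop ((file - 1) + 1).toNat bb1 (rank - 1) (file - 1)

-- ===== PORT B =====
def bishopForeslashGen_alt (index : Int) : Int :=
  if index < 0 then 0  -- the Python B raises ValueError here; outside Pre_, value unconstrained
  else
    let rank := PySem.Int.floordiv index 8
    let file := PySem.Int.mod index 8
    (PySem.List.pyRange 0 8 1).foldl (fun bb r =>
      let f := file + (r - rank)
      if 0 ≤ f ∧ f < 8 ∧ r ≠ rank then PySem.Int.bor bb ((1 : Int) <<< (r * 8 + f).toNat) else bb) 0

-- ===== PRECONDITION & SPEC =====
-- B raises ValueError on negative square indices (a caller error); on those inputs A either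
-- raises itself (a negative shift amount in its northeast walk) or returns an accidental
-- bitboard for a wrapped-around negative rank/file, so they lie outside Pre_.
def Pre_bishopForeslashGen (index : Int) : Prop := 0 ≤ index
instance (index : Int) : Decidable (Pre_bishopForeslashGen index) := by unfold Pre_bishopForeslashGen; infer_instance
def pvWitness_bishopForeslashGen : Int := 27

def Spec_bishopForeslashGen (index : Int) (out : Int) : Prop := out = bishopForeslashGen_alt index
instance (index : Int) (out : Int) : Decidable (Spec_bishopForeslashGen index out) := by unfold Spec_bishopForeslashGen; infer_instance

-- ===== CLAIM (what is proved, stated in full; the proofs are below) =====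
def Claim_equal_bishopForeslashGen : Prop := ∀ (index : Int), Dom_bishopForeslashGen index → Pre_bishopForeslashGen index → Spec_bishopForeslashGen index (bishopForeslashGen index)

-- ===== LEMMAS AND PROOFS =====

-- basic facts about rank = index // 8, file = index % 8
lemma pvRankFile (index : Int) :
    PySem.Int.floordiv index 8 * 8 + PySem.Int.mod index 8 = index ∧
    0 ≤ PySem.Int.mod index 8 ∧ PySem.Int.mod index 8 < 8 :=
  ⟨PySem.Int.floordiv_mul_add_mod index 8, PySem.Int.mod_nonneg index (by norm_num),
   PySem.Int.mod_lt index (by norm_num)⟩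

-- a shifted-in bit at position ≥ 64 is erased by the uint64 mask
lemma pvBandHigh (e : Nat) (he : 64 ≤ e) :
    PySem.Int.band ((1 : Int) <<< e) 18446744073709551615 = 0 := by
  have h1 : (1 : Int) <<< e = ((2 ^ e : Nat) : Int) := by
    rw [Int.shiftLeft_eq]; push_cast; ring
  have h2 : (18446744073709551615 : Int) = ((18446744073709551615 : Nat) : Int) := by norm_num
  rw [h1, h2, PySem.Int.band_natCast]
  norm_cast
  have h3 : (18446744073709551615 : Nat) = 2 ^ 64 - 1 := by norm_num
  rw [h3, Nat.and_two_pow_sub_one_eq_mod]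
  exact Nat.mod_eq_zero_of_dvd (pow_dvd_pow 2 he)

-- the southwest walk with accumulator 0 stays 0 while atkRank - atkFile ≥ 8
lemma pvSwZero : ∀ (n : Nat) (aR aF : Int), 8 ≤ aR - aF → pvSwLoop n 0 aR aF = 0 := by
  intro n
  induction n with
  | zero => intro aR aF _; rfl
  | succ m ih =>
    intro aR aF hd
    show (if 0 ≤ aR ∧ 0 ≤ aF then _ else _) = 0
    by_cases hc : 0 ≤ aR ∧ 0 ≤ aF
    · rw [if_pos hc]
      have he : 64 ≤ (aR * 8 + aF).toNat := by omega
      rw [PySem.Int.bor_comm, PySem.Int.bor_zero, pvBandHigh _ he]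
      exact ih (aR - 1) (aF - 1) (by omega)
    · rw [if_neg hc]

-- folding a step that never fires leaves the accumulator
lemma pvFoldlId {α β : Type} (g : β → α → β) (L : List α) (bb : β)
    (h : ∀ b a, a ∈ L → g b a = b) : L.foldl g bb = bb := by
  induction L generalizing bb with
  | nil => rfl
  | cons x xs ih => simp only [List.foldl_cons, h bb x (by simp)]; exact ih bb (fun b a ha => h b a (by simp [ha]))

-- B returns 0 whenever the index is non-negative and no board rank r carries an admissible square
lemma pvAltZero (index : Int) (hnn : 0 ≤ index)
    (h : ∀ r : Int, 0 ≤ r → r < 8 →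
      ¬(0 ≤ PySem.Int.mod index 8 + (r - PySem.Int.floordiv index 8) ∧
        PySem.Int.mod index 8 + (r - PySem.Int.floordiv index 8) < 8 ∧
        r ≠ PySem.Int.floordiv index 8)) : bishopForeslashGen_alt index = 0 := by
  unfold bishopForeslashGen_alt
  rw [if_neg (by omega)]
  refine pvFoldlId _ _ _ ?_
  intro b r hr
  rw [PySem.List.mem_pyRange_one] at hr
  simp only [if_neg (h r hr.1 hr.2)]

-- the finite part: 0 ≤ index ≤ 127 (rank ≤ 15), checked by the kernel
set_option maxRecDepth 40000 in
set_option maxHeartbeats 1000000 in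
lemma pvMid : ∀ n : Nat, n < 128 → bishopForeslashGen (n : Int) = bishopForeslashGen_alt (n : Int) := by
  decide

-- ===== VERDICT (by name: the statement is the Claim_ definition above) =====
theorem bishopForeslashGen_spec : Claim_equal_bishopForeslashGen := by
  intro index _ hpre
  unfold Spec_bishopForeslashGen
  unfold Pre_bishopForeslashGen at hpre
  obtain ⟨hrf, hf0, hf8⟩ := pvRankFile index
  by_cases hmid : index ≤ 127
  · have hn : index = ((index.toNat : Nat) : Int) := by omega
    rw [hn]; exact pvMid index.toNat (by omega)
  · -- index ≥ 128, rank ≥ 16: A's northeast loop has zero fuel; the southwest walk is fully masked away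
    have hr16 : 16 ≤ PySem.Int.floordiv index 8 := by omega
    have hA : bishopForeslashGen index = 0 := by
      show pvSwLoop ((PySem.Int.mod index 8 - 1) + 1).toNat
        (pvNeLoop (8 - (PySem.Int.floordiv index 8 + 1)).toNat 0 (PySem.Int.floordiv index 8 + 1) (PySem.Int.mod index 8 + 1))
        (PySem.Int.floordiv index 8 - 1) (PySem.Int.mod index 8 - 1) = 0
      have h0 : (8 - (PySem.Int.floordiv index 8 + 1)).toNat = 0 := by omega
      rw [h0]
      show pvSwLoop _ (0 : Int) _ _ = 0
      exact pvSwZero _ _ _ (by omega)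
    rw [hA]
    symm
    exact pvAltZero index hpre (fun r h0 h8 => by omega)
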